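-- pv_equiv track=rewrite | github.com/luxurahair/luxura-inventory-api | app/services/wix_sync.py | _extract_length_color_from_choices
-- ===== SOURCE A (Python) =====
-- from typing import Any, Dict, List, Optional, Tuple
--
-- def _clean_text(value: Optional[str]) -> Optional[str]:
--     if not value:
--         return value
--     return (
--         value.replace("”", '"')
--         .replace("“", '"')
--         .replace("\u00a0", " ")
--         .strip()
--     )
--
-- def _extract_length_color_from_choices(choices: Dict[str, Any]) -> Tuple[Optional[str], Optional[str]]:
--     """
--     Essaie de repérer la longueur et la couleur dans les choices Wix.
--     Les clés sont souvent du genre "Longueur" / "Couleur" ou "Length" / "Color".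
--     """
--     length: Optional[str] = None
--     color: Optional[str] = None
--     for opt_name, val in choices.items():
--         on = (opt_name or "").lower()
--         if "long" in on or "length" in on:
--             length = _clean_text(str(val))
--         if "coul" in on or "color" in on:
--             color = _clean_text(str(val))
--     return length, color
-- ===== SOURCE B (Python) =====
-- from typing import Any, Dict, Optional, Tuple
--
-- def _clean_text(value: Optional[str]) -> Optional[str]:
--     if not value:
--         return value
--     return (
--         value.replace("\u201d", '"')
--         .replace("\u201c", '"')
--         .replace("\u00a0", " ")
--         .strip()
--     )
--
-- def _pick(items, keywords):
--     # last matching key wins = first match scanning the items in reverse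
--     for opt_name, val in reversed(items):
--         on = (opt_name or "").lower()
--         if any(w in on for w in keywords):
--             return _clean_text(str(val))
--     return None
--
-- def _extract_length_color_from_choices(choices: Dict[str, Any]) -> Tuple[Optional[str], Optional[str]]:
--     items = list(choices.items())
--     return _pick(items, ("long", "length")), _pick(items, ("coul", "color"))
-- ===== Notes on version B (the rewrite author's own statement) =====
-- stated objective: alternative
-- what changed: Replaces A's single forward fold that keeps overwriting two accumulators with two independent reverse scans that each return the first matching entry (last-match-wins) via a shared _pick helper.
import Mathlib
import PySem

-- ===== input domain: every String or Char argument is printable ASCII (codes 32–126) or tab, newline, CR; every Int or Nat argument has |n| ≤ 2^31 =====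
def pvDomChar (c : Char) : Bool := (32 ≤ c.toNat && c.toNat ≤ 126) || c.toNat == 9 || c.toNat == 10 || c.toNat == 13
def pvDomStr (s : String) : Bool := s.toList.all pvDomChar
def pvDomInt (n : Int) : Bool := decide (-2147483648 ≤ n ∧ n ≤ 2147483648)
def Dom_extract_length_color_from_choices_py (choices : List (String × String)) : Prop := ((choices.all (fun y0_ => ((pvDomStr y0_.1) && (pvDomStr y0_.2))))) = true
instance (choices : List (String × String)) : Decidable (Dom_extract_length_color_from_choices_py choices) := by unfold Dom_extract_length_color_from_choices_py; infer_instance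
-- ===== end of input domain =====

-- B replaces A's single forward fold with two independent reverse first-match scans; return values proved equal (objective: alternative decomposition).

-- ===== PORT A =====
-- _clean_text; str(val) on a str is the identity, '(opt_name or "")' is the identity on strings
def pvCleanText (s : String) : String :=
  if s = "" then s
  else PySem.Str.strip (PySem.Str.replace (PySem.Str.replace (PySem.Str.replace s "\u201d" "\"") "\u201c" "\"") "\u00a0" " ")

def extract_length_color_from_choices_py (choices : List (String × String)) : Option String × Option String :=
  choices.foldl
    (fun st p =>
      let on := PySem.Str.lower p.1
      let st1 := if PySem.Str.isIn "long" on || PySem.Str.isIn "length" on then (some (pvCleanText p.2), st.2) else st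
      if PySem.Str.isIn "coul" on || PySem.Str.isIn "color" on then (st1.1, some (pvCleanText p.2)) else st1)
    (none, none)

-- ===== PORT B =====
def pvPick (kws : List String) : List (String × String) → Option String
  | [] => none
  | (k, v) :: rest =>
      if kws.any (fun w => PySem.Str.isIn w (PySem.Str.lower k)) then some (pvCleanText v)
      else pvPick kws rest

def extract_length_color_from_choices_py_alt (choices : List (String × String)) : Option String × Option String :=
  (pvPick ["long", "length"] choices.reverse, pvPick ["coul", "color"] choices.reverse)

-- ===== PRECONDITION & SPEC =====
def Spec_extract_length_color_from_choices_py (choices : List (String × String)) (out : Option String × Option String) : Prop := out = extract_length_color_from_choices_py_alt choices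
instance (choices : List (String × String)) (out : Option String × Option String) : Decidable (Spec_extract_length_color_from_choices_py choices out) := by unfold Spec_extract_length_color_from_choices_py; infer_instance

-- ===== CLAIM (what is proved, stated in full; the proofs are below) =====
def Claim_equal_extract_length_color_from_choices_py : Prop := ∀ (choices : List (String × String)), Dom_extract_length_color_from_choices_py choices → Spec_extract_length_color_from_choices_py choices (extract_length_color_from_choices_py choices)

-- ===== LEMMAS AND PROOFS =====

theorem pvPick_append (kws : List String) (l1 l2 : List (String × String)) :
    pvPick kws (l1 ++ l2) = (pvPick kws l1).orElse (fun _ => pvPick kws l2) := by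
  induction l1 with
  | nil => rfl
  | cons p rest ih =>
      obtain ⟨k, v⟩ := p
      simp only [List.cons_append, pvPick]
      split <;> simp [ih, Option.orElse]

-- A's fold from an arbitrary start state, expressed through B's reverse first-match scans
theorem pvFold_eq_pick (xs : List (String × String)) :
    ∀ init : Option String × Option String,
      xs.foldl
        (fun st p =>
          let on := PySem.Str.lower p.1
          let st1 := if PySem.Str.isIn "long" on || PySem.Str.isIn "length" on then (some (pvCleanText p.2), st.2) else st
          if PySem.Str.isIn "coul" on || PySem.Str.isIn "color" on then (st1.1, some (pvCleanText p.2)) else st1)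
        init
      = ((pvPick ["long", "length"] xs.reverse).orElse (fun _ => init.1),
         (pvPick ["coul", "color"] xs.reverse).orElse (fun _ => init.2)) := by
  induction xs with
  | nil => intro init; simp [pvPick, Option.orElse]
  | cons p rest ih =>
      intro init
      obtain ⟨k, v⟩ := p
      simp only [List.foldl_cons, List.reverse_cons, pvPick_append, ih]
      simp only [pvPick, List.any_cons, List.any_nil, Bool.or_false]
      cases pvPick ["long", "length"] rest.reverse <;>
        cases pvPick ["coul", "color"] rest.reverse <;>
          split <;> split <;> simp [Option.orElse]

-- ===== VERDICT (by name: the statement is the Claim_ definition above) =====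
theorem extract_length_color_from_choices_py_spec : Claim_equal_extract_length_color_from_choices_py := by
  intro choices _
  unfold Spec_extract_length_color_from_choices_py extract_length_color_from_choices_py extract_length_color_from_choices_py_alt
  rw [pvFold_eq_pick]
  cases h1 : pvPick ["long", "length"] choices.reverse <;>
    cases h2 : pvPick ["coul", "color"] choices.reverse <;> simp [Option.orElse]
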